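-- pv_equiv track=rewrite | github.com/DarkOnGithub/Advent-of-code | 2024/12/day12.py | count_unique_boundary_segments
-- ===== SOURCE A (Python) =====
-- from typing import Dict, List, Set, Tuple
--
-- def count_unique_boundary_segments(
--     region_boundary: Set[Tuple[int, int, int, int]],
--     search_directions: List[Tuple[int, int]]
-- ) -> int:
--     boundary_segments = set()
--     visited_boundary_positions = set()
--
--     for boundary_position in region_boundary:
--         r, c = boundary_position[:2]
--
--         if (r, c) in visited_boundary_positions:
--             continue
--
--         current_segment = [(r, c)]
--         visited_boundary_positions.add((r, c))
--         boundary_segments.add((r, c))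
--
--         while current_segment:
--             curr_r, curr_c = current_segment.pop()
--
--             for dr, dc in search_directions:
--                 nr, nc = curr_r + dr, curr_c + dc
--
--                 neighbor_boundary = [bp for bp in region_boundary if bp[:2] == (nr, nc)]
--
--                 for _ in neighbor_boundary:
--                     if (nr, nc) not in visited_boundary_positions:
--                         current_segment.append((nr, nc))
--                         visited_boundary_positions.add((nr, nc))
--                         boundary_segments.add((nr, nc))
--
--     return len(boundary_segments)
-- ===== SOURCE B (Python) =====
-- def count_unique_boundary_segments(region_boundary, search_directions):
--     # Every position becomes a counted segment cell exactly once, and only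
--     # first-two-coordinate pairs present in region_boundary are ever counted,
--     # so the answer is just the number of distinct (r, c) prefixes.
--     return len({bp[:2] for bp in region_boundary})
-- ===== Notes on version B (the rewrite author's own statement) =====
-- stated objective: faster
-- what changed: Replaced the per-seed flood fill with its quadratic neighbor re-scans of region_boundary by a single pass collecting the set of distinct (r,c) prefixes, whose size is provably what A counts.
import Mathlib
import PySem

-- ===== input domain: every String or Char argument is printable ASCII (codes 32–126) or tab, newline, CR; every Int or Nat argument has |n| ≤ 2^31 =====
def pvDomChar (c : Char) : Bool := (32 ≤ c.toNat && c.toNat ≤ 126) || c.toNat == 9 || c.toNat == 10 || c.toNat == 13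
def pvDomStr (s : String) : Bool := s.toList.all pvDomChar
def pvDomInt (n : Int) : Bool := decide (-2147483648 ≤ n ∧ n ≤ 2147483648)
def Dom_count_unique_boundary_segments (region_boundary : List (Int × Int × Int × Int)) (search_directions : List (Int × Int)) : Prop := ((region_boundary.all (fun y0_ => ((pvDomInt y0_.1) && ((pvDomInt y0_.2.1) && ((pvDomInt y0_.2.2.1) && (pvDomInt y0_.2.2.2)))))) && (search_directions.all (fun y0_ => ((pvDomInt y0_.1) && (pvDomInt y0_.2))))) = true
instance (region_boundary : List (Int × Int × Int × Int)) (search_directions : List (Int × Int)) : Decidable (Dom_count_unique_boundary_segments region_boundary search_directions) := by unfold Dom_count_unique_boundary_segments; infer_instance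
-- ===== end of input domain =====

-- B collapses A's per-seed flood fill into counting the distinct (r,c) prefixes in one pass (measurably faster).


-- ===== PORT A =====
-- body of 'for _ in neighbor_boundary': state is (current_segment, visited_boundary_positions, boundary_segments)
-- (the stack is held top-first: Python appends and pops at the same end, here the head)
def pvVisit (nr nc : Int)
    (st : List (Int × Int) × PySem.Set (Int × Int) × PySem.Set (Int × Int)) :
    List (Int × Int) × PySem.Set (Int × Int) × PySem.Set (Int × Int) :=
  if (nr, nc) ∈ st.2.1 then st
  else ((nr, nc) :: st.1, PySem.Set.add st.2.1 (nr, nc), PySem.Set.add st.2.2 (nr, nc))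

-- body of 'for dr, dc in search_directions'
def pvDirStep (region_boundary : List (Int × Int × Int × Int)) (cr cc : Int)
    (st : List (Int × Int) × PySem.Set (Int × Int) × PySem.Set (Int × Int))
    (d : Int × Int) :
    List (Int × Int) × PySem.Set (Int × Int) × PySem.Set (Int × Int) :=
  let nr := cr + d.1
  let nc := cc + d.2
  let neighbor_boundary := region_boundary.filter (fun bp => bp.1 == nr && bp.2.1 == nc)
  neighbor_boundary.foldl (fun st _ => pvVisit nr nc st) st

-- the 'while current_segment' loop; fuel region_boundary.length + 1 bounds the pops (each
-- iteration pops one position, and every push marks a fresh (r,c) of region_boundary visited)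
def pvBfs (region_boundary : List (Int × Int × Int × Int)) (search_directions : List (Int × Int)) :
    Nat → List (Int × Int) → PySem.Set (Int × Int) → PySem.Set (Int × Int) →
    PySem.Set (Int × Int) × PySem.Set (Int × Int)
  | 0, _, vis, segs => (vis, segs)
  | _ + 1, [], vis, segs => (vis, segs)
  | fuel + 1, (cr, cc) :: stack, vis, segs =>
      let st := search_directions.foldl (pvDirStep region_boundary cr cc) (stack, vis, segs)
      pvBfs region_boundary search_directions fuel st.1 st.2.1 st.2.2

-- body of 'for boundary_position in region_boundary'
def pvSeed (region_boundary : List (Int × Int × Int × Int)) (search_directions : List (Int × Int))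
    (vs : PySem.Set (Int × Int) × PySem.Set (Int × Int)) (bp : Int × Int × Int × Int) :
    PySem.Set (Int × Int) × PySem.Set (Int × Int) :=
  let r := bp.1
  let c := bp.2.1
  if (r, c) ∈ vs.1 then vs
  else pvBfs region_boundary search_directions (region_boundary.length + 1) [(r, c)]
        (PySem.Set.add vs.1 (r, c)) (PySem.Set.add vs.2 (r, c))

def count_unique_boundary_segments (region_boundary : List (Int × Int × Int × Int)) (search_directions : List (Int × Int)) : Int :=
  let res := region_boundary.foldl (pvSeed region_boundary search_directions)
    (PySem.Set.empty, PySem.Set.empty)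
  (res.2.length : Int)

-- ===== PORT B =====
def count_unique_boundary_segments_alt (region_boundary : List (Int × Int × Int × Int)) (search_directions : List (Int × Int)) : Int :=
  ((PySem.Set.ofList (region_boundary.map (fun bp => (bp.1, bp.2.1)))).length : Int)

-- ===== PRECONDITION & SPEC =====
def Spec_count_unique_boundary_segments (region_boundary : List (Int × Int × Int × Int)) (search_directions : List (Int × Int)) (out : Int) : Prop := out = count_unique_boundary_segments_alt region_boundary search_directions
instance (region_boundary : List (Int × Int × Int × Int)) (search_directions : List (Int × Int)) (out : Int) : Decidable (Spec_count_unique_boundary_segments region_boundary search_directions out) := by unfold Spec_count_unique_boundary_segments; infer_instance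

-- ===== CLAIM (what is proved, stated in full; the proofs are below) =====
def Claim_equal_count_unique_boundary_segments : Prop := ∀ (region_boundary : List (Int × Int × Int × Int)) (search_directions : List (Int × Int)), Dom_count_unique_boundary_segments region_boundary search_directions → Spec_count_unique_boundary_segments region_boundary search_directions (count_unique_boundary_segments region_boundary search_directions)

-- ===== LEMMAS AND PROOFS =====

-- the invariant carried through A's loops: the visited set is duplicate-free, contains only
-- (r,c) prefixes of region_boundary, and keeps everything already visited (v0)
def pvInv (region_boundary : List (Int × Int × Int × Int)) (v0 : List (Int × Int))
    (v : List (Int × Int)) : Prop :=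
  v.Nodup ∧ (∀ x ∈ v, x ∈ region_boundary.map (fun bp => (bp.1, bp.2.1))) ∧ (∀ x ∈ v0, x ∈ v)

theorem pvInv_add (rb : List (Int × Int × Int × Int)) (v0 v : List (Int × Int)) (p : Int × Int)
    (hp : p ∈ rb.map (fun bp => (bp.1, bp.2.1))) (h : pvInv rb v0 v) :
    pvInv rb v0 (PySem.Set.add v p) := by
  obtain ⟨h1, h2, h3⟩ := h
  refine ⟨PySem.Set.nodup_add v p h1, ?_, ?_⟩
  · intro x hx
    rcases (PySem.Set.mem_add v p x).1 hx with hx | rfl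
    · exact h2 x hx
    · exact hp
  · intro x hx
    exact (PySem.Set.mem_add v p x).2 (Or.inl (h3 x hx))

theorem pvInv_visit (rb : List (Int × Int × Int × Int)) (v0 : List (Int × Int)) (nr nc : Int)
    (st : List (Int × Int) × PySem.Set (Int × Int) × PySem.Set (Int × Int))
    (hp : (nr, nc) ∈ rb.map (fun bp => (bp.1, bp.2.1))) (h : pvInv rb v0 st.2.1) :
    pvInv rb v0 (pvVisit nr nc st).2.1 := by
  unfold pvVisit
  split
  · exact h
  · exact pvInv_add rb v0 st.2.1 (nr, nc) hp h

theorem pvInv_dirStep (rb : List (Int × Int × Int × Int)) (v0 : List (Int × Int)) (cr cc : Int)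
    (st : List (Int × Int) × PySem.Set (Int × Int) × PySem.Set (Int × Int)) (d : Int × Int)
    (h : pvInv rb v0 st.2.1) :
    pvInv rb v0 (pvDirStep rb cr cc st d).2.1 := by
  unfold pvDirStep
  refine List.foldlRecOn (motive := fun (s : List (Int × Int) × PySem.Set (Int × Int) × PySem.Set (Int × Int)) => pvInv rb v0 s.2.1) _ _ h ?_
  intro b hb a ha
  refine pvInv_visit rb v0 _ _ b ?_ hb
  rcases List.mem_filter.1 ha with ⟨hmem, hcond⟩
  simp only [Bool.and_eq_true, beq_iff_eq] at hcond
  exact List.mem_map.2 ⟨a, hmem, by simp [hcond.1, hcond.2]⟩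

theorem pvInv_bfs (rb : List (Int × Int × Int × Int)) (sd : List (Int × Int))
    (v0 : List (Int × Int)) :
    ∀ (fuel : Nat) (stack : List (Int × Int)) (vis segs : PySem.Set (Int × Int)),
      pvInv rb v0 vis → pvInv rb v0 (pvBfs rb sd fuel stack vis segs).1 := by
  intro fuel
  induction fuel with
  | zero => intro stack vis segs h; exact h
  | succ n ih =>
    intro stack vis segs h
    cases stack with
    | nil => exact h
    | cons p rest =>
      obtain ⟨cr, cc⟩ := p
      simp only [pvBfs]
      apply ih
      exact List.foldlRecOn (motive := fun s => pvInv rb v0 s.2.1) sd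
        (pvDirStep rb cr cc) (b := (rest, vis, segs)) h
        (fun b hb a _ => pvInv_dirStep rb v0 cr cc b a hb)

-- the two sets A maintains receive exactly the same insertions, so they stay equal lists
theorem pvEq_visit (nr nc : Int)
    (st : List (Int × Int) × PySem.Set (Int × Int) × PySem.Set (Int × Int))
    (h : st.2.1 = st.2.2) : (pvVisit nr nc st).2.1 = (pvVisit nr nc st).2.2 := by
  unfold pvVisit
  split
  · exact h
  · simp [h]

theorem pvEq_dirStep (rb : List (Int × Int × Int × Int)) (cr cc : Int)
    (st : List (Int × Int) × PySem.Set (Int × Int) × PySem.Set (Int × Int)) (d : Int × Int)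
    (h : st.2.1 = st.2.2) :
    (pvDirStep rb cr cc st d).2.1 = (pvDirStep rb cr cc st d).2.2 := by
  unfold pvDirStep
  exact List.foldlRecOn
    (motive := fun (s : List (Int × Int) × PySem.Set (Int × Int) × PySem.Set (Int × Int)) => s.2.1 = s.2.2)
    _ _ h (fun b hb a _ => pvEq_visit _ _ b hb)

theorem pvEq_bfs (rb : List (Int × Int × Int × Int)) (sd : List (Int × Int)) :
    ∀ (fuel : Nat) (stack : List (Int × Int)) (vis segs : PySem.Set (Int × Int)),
      vis = segs →
      (pvBfs rb sd fuel stack vis segs).1 = (pvBfs rb sd fuel stack vis segs).2 := by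
  intro fuel
  induction fuel with
  | zero => intro stack vis segs h; exact h
  | succ n ih =>
    intro stack vis segs h
    cases stack with
    | nil => exact h
    | cons p rest =>
      obtain ⟨cr, cc⟩ := p
      simp only [pvBfs]
      apply ih
      exact List.foldlRecOn (motive := fun s => s.2.1 = s.2.2) sd
        (pvDirStep rb cr cc) (b := (rest, vis, segs)) h
        (fun b hb a _ => pvEq_dirStep rb cr cc b a hb)

theorem pvInv_seed (rb : List (Int × Int × Int × Int)) (sd : List (Int × Int))
    (v0 : List (Int × Int)) (vs : PySem.Set (Int × Int) × PySem.Set (Int × Int))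
    (bp : Int × Int × Int × Int) (hbp : bp ∈ rb) (h : pvInv rb v0 vs.1) :
    pvInv rb v0 (pvSeed rb sd vs bp).1 ∧ (bp.1, bp.2.1) ∈ (pvSeed rb sd vs bp).1 := by
  simp only [pvSeed]
  split
  · exact ⟨h, by assumption⟩
  · have hp : (bp.1, bp.2.1) ∈ rb.map (fun bp => (bp.1, bp.2.1)) :=
      List.mem_map.2 ⟨bp, hbp, rfl⟩
    have hadd : pvInv rb v0 (PySem.Set.add vs.1 (bp.1, bp.2.1)) := pvInv_add rb v0 vs.1 _ hp h
    have hres := pvInv_bfs rb sd v0 (rb.length + 1) [(bp.1, bp.2.1)]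
      (PySem.Set.add vs.1 (bp.1, bp.2.1)) (PySem.Set.add vs.2 (bp.1, bp.2.1)) hadd
    refine ⟨hres, ?_⟩
    -- membership is preserved: the seed is added before the BFS and pvInv keeps v0
    have hmem : (bp.1, bp.2.1) ∈ PySem.Set.add vs.1 (bp.1, bp.2.1) :=
      (PySem.Set.mem_add vs.1 _ _).2 (Or.inr rfl)
    have hmono := pvInv_bfs rb sd (PySem.Set.add vs.1 (bp.1, bp.2.1)) (rb.length + 1)
      [(bp.1, bp.2.1)] (PySem.Set.add vs.1 (bp.1, bp.2.1)) (PySem.Set.add vs.2 (bp.1, bp.2.1))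
      ⟨hadd.1, hadd.2.1, fun x hx => hx⟩
    exact hmono.2.2 _ hmem

theorem pvEq_seed (rb : List (Int × Int × Int × Int)) (sd : List (Int × Int))
    (vs : PySem.Set (Int × Int) × PySem.Set (Int × Int)) (bp : Int × Int × Int × Int)
    (h : vs.1 = vs.2) : (pvSeed rb sd vs bp).1 = (pvSeed rb sd vs bp).2 := by
  simp only [pvSeed]
  split
  · exact h
  · exact pvEq_bfs rb sd _ _ _ _ (by rw [h])

-- the outer fold: everything seeded stays in, nothing outside the prefixes gets in
theorem pvOuter (rb : List (Int × Int × Int × Int)) (sd : List (Int × Int)) :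
    ∀ (l : List (Int × Int × Int × Int)) (v0 : List (Int × Int))
      (vs : PySem.Set (Int × Int) × PySem.Set (Int × Int)),
      (∀ bp ∈ l, bp ∈ rb) → pvInv rb v0 vs.1 →
      pvInv rb v0 (l.foldl (pvSeed rb sd) vs).1 ∧
        (∀ bp ∈ l, (bp.1, bp.2.1) ∈ (l.foldl (pvSeed rb sd) vs).1) := by
  intro l
  induction l with
  | nil => intro v0 vs _ h; exact ⟨h, by simp⟩
  | cons bp rest ih =>
    intro v0 vs hsub h
    have hbp : bp ∈ rb := hsub bp (List.mem_cons_self)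
    have hstep := pvInv_seed rb sd v0 vs bp hbp h
    have hrest := ih v0 (pvSeed rb sd vs bp) (fun x hx => hsub x (List.mem_cons_of_mem _ hx))
      hstep.1
    -- bp's prefix survives the rest of the fold: run the fold's pvInv with v0 := the seeded set
    have hmono := ih (pvSeed rb sd vs bp).1 (pvSeed rb sd vs bp)
      (fun x hx => hsub x (List.mem_cons_of_mem _ hx))
      ⟨hstep.1.1, hstep.1.2.1, fun x hx => hx⟩
    refine ⟨hrest.1, ?_⟩
    intro x hx
    rcases List.mem_cons.1 hx with rfl | hx
    · exact (hmono.1).2.2 _ hstep.2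
    · exact hrest.2 x hx

theorem pvEq_outer (rb : List (Int × Int × Int × Int)) (sd : List (Int × Int)) :
    ∀ (l : List (Int × Int × Int × Int)) (vs : PySem.Set (Int × Int) × PySem.Set (Int × Int)),
      vs.1 = vs.2 → (l.foldl (pvSeed rb sd) vs).1 = (l.foldl (pvSeed rb sd) vs).2 := by
  intro l
  induction l with
  | nil => intro vs h; exact h
  | cons bp rest ih => intro vs h; exact ih _ (pvEq_seed rb sd vs bp h)

-- ===== VERDICT (by name: the statement is the Claim_ definition above) =====
theorem count_unique_boundary_segments_spec : Claim_equal_count_unique_boundary_segments := by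
  intro rb sd _
  show (((rb.foldl (pvSeed rb sd) (PySem.Set.empty, PySem.Set.empty)).2.length : Nat) : Int) =
    ((PySem.Set.ofList (rb.map (fun bp => (bp.1, bp.2.1)))).length : Int)
  have h0 : pvInv rb ([] : List (Int × Int)) (PySem.Set.empty : PySem.Set (Int × Int)) :=
    ⟨List.nodup_nil, by simp [PySem.Set.empty], by simp⟩
  have hmain := pvOuter rb sd rb [] (PySem.Set.empty, PySem.Set.empty) (fun _ h => h) h0
  have heq := pvEq_outer rb sd rb (PySem.Set.empty, PySem.Set.empty) rfl
  set res := rb.foldl (pvSeed rb sd) (PySem.Set.empty, PySem.Set.empty) with hres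
  have hperm : res.1.Perm (PySem.Set.ofList (rb.map (fun bp => (bp.1, bp.2.1)))) := by
    refine (List.perm_ext_iff_of_nodup hmain.1.1 (PySem.Set.nodup_ofList _)).2 ?_
    intro x
    rw [PySem.Set.mem_ofList]
    constructor
    · exact fun hx => hmain.1.2.1 x hx
    · intro hx
      rcases List.mem_map.1 hx with ⟨bp, hbp, rfl⟩
      exact hmain.2 bp hbp
  rw [← heq]
  exact_mod_cast hperm.length_eq
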